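-- pv_equiv track=rewrite | github.com/H1rono/atcoder-answers | ABC274/d-review.py | solve_axis
-- ===== SOURCE A (Python) =====
-- from typing import List
-- from collections import deque
--
-- def solve_axis(goal: int, ps: List[int]) -> bool:
--     l = len(ps)
--     seen = [set() for _ in range(l + 1)]
--     que = deque()
--     que.append((0, 0))
--     while que:
--         i, p = que.popleft()
--         if p in seen[i]:
--             continue
--         if i == l:
--             if goal == p:
--                 return True
--             continue
--         seen[i].add(p)
--         dp = ps[i]
--         que.append((i + 1, p + dp))
--         que.append((i + 1, p - dp))
--     return False
-- ===== SOURCE B (Python) =====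
-- from typing import List
--
-- def solve_axis(goal: int, ps: List[int]) -> bool:
--     reach = {0}
--     for p in ps:
--         reach = {s + p for s in reach} | {s - p for s in reach}
--     return goal in reach
-- ===== Notes on version B (the rewrite author's own statement) =====
-- stated objective: simpler
-- what changed: Replaces the BFS over a deque of (level, partial-sum) states with per-level seen-sets by a single set of reachable sums rebuilt once per element; the queue, popleft loop and duplicate-skip control flow disappear.
import Mathlib
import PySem

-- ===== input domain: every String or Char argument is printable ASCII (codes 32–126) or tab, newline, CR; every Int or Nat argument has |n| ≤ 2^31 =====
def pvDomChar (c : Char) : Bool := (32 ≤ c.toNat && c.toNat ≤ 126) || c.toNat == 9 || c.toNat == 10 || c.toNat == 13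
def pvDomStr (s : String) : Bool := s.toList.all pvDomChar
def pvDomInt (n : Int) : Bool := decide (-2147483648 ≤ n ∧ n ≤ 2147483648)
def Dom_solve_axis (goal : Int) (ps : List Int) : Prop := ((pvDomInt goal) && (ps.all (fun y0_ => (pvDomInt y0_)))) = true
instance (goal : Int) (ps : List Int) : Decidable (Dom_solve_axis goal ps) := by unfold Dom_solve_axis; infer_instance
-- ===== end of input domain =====

-- B replaces A's deque-BFS with per-level seen-sets by one reachable-sum set rebuilt per element (simpler; same return value).

-- ===== PORT A =====
-- A's while-que loop; the fuel 2^(len(ps)+2) is proved sufficient below (pvPhi strictly decreases each iteration)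
def pvLoopA (goal : Int) (ps : List Int) : Nat → List (PySem.Set Int) → List (Nat × Int) → Bool
  | 0, _, _ => false
  | fuel+1, seen, que =>
    match que with
    | [] => false
    | (i, p) :: rest =>
      if PySem.Set.contains (seen.getD i PySem.Set.empty) p then
        pvLoopA goal ps fuel seen rest
      else if i = ps.length then
        (if goal = p then true else pvLoopA goal ps fuel seen rest)
      else
        pvLoopA goal ps fuel
          (seen.set i (PySem.Set.add (seen.getD i PySem.Set.empty) p))
          (rest ++ [(i+1, p + ps.getD i 0), (i+1, p - ps.getD i 0)])

def solve_axis (goal : Int) (ps : List Int) : Bool :=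
  pvLoopA goal ps (2 ^ (ps.length + 2)) (List.replicate (ps.length + 1) PySem.Set.empty) [(0, 0)]

-- ===== PORT B =====
def solve_axis_alt (goal : Int) (ps : List Int) : Bool :=
  (ps.foldl
    (fun r p => PySem.Set.union (PySem.Set.ofList (r.map (· + p))) (r.map (· - p)))
    (PySem.Set.ofList [0])).contains goal

-- ===== PRECONDITION & SPEC =====
def Spec_solve_axis (goal : Int) (ps : List Int) (out : Bool) : Prop := out = solve_axis_alt goal ps
instance (goal : Int) (ps : List Int) (out : Bool) : Decidable (Spec_solve_axis goal ps out) := by unfold Spec_solve_axis; infer_instance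

-- ===== CLAIM (what is proved, stated in full; the proofs are below) =====
def Claim_equal_solve_axis : Prop := ∀ (goal : Int) (ps : List Int), Dom_solve_axis goal ps → Spec_solve_axis goal ps (solve_axis goal ps)

-- ===== LEMMAS AND PROOFS =====

-- all signed sums over the list (reference spec both ports are reduced to)
def pvSums : List Int → List Int
  | [] => [0]
  | p :: rest => (pvSums rest).map (· + p) ++ (pvSums rest).map (· - p)

-- "some queue entry can still reach goal"
def pvG (goal : Int) (ps : List Int) (que : List (Nat × Int)) : Prop :=
  ∃ e ∈ que, ∃ s ∈ pvSums (ps.drop e.1), goal = e.2 + s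

-- queue entries are well-formed reachable states
def pvInvW (ps : List Int) (que : List (Nat × Int)) : Prop :=
  ∀ e ∈ que, e.1 ≤ ps.length ∧ e.2 ∈ pvSums (ps.take e.1)

-- seen sets hold only reachable states of levels < len(ps)
def pvInvSeen (ps : List Int) (seen : List (PySem.Set Int)) : Prop :=
  seen.length = ps.length + 1 ∧
  ∀ i : Nat, ∀ q ∈ seen.getD i PySem.Set.empty, i < ps.length ∧ q ∈ pvSums (ps.take i)

-- every child of a seen state is seen, still queued, or a non-goal leaf
def pvInvClos (goal : Int) (ps : List Int) (seen : List (PySem.Set Int)) (que : List (Nat × Int)) : Prop :=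
  ∀ i : Nat, ∀ q ∈ seen.getD i PySem.Set.empty,
    ∀ c ∈ [q + ps.getD i 0, q - ps.getD i 0],
      c ∈ seen.getD (i+1) PySem.Set.empty ∨ (i+1, c) ∈ que ∨ (i+1 = ps.length ∧ c ≠ goal)

-- number of not-yet-seen states
def pvU (ps : List Int) (seen : List (PySem.Set Int)) : Nat :=
  ∑ i ∈ Finset.range ps.length,
    ((PySem.List.dedup (pvSums (ps.take i))).filter
      (fun q => !(PySem.Set.contains (seen.getD i PySem.Set.empty) q))).length

def pvPhi (ps : List Int) (seen : List (PySem.Set Int)) (que : List (Nat × Int)) : Nat :=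
  2 * pvU ps seen + que.length

theorem pvLoopA_cons (goal : Int) (ps : List Int) (fuel : Nat)
    (seen : List (PySem.Set Int)) (i : Nat) (p : Int) (rest : List (Nat × Int)) :
    pvLoopA goal ps (fuel+1) seen ((i, p) :: rest) =
      (if PySem.Set.contains (seen.getD i PySem.Set.empty) p then
        pvLoopA goal ps fuel seen rest
      else if i = ps.length then
        (if goal = p then true else pvLoopA goal ps fuel seen rest)
      else
        pvLoopA goal ps fuel
          (seen.set i (PySem.Set.add (seen.getD i PySem.Set.empty) p))
          (rest ++ [(i+1, p + ps.getD i 0), (i+1, p - ps.getD i 0)])) := rfl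

theorem pvMem_sums_cons {p : Int} {rest : List Int} {x : Int} :
    x ∈ pvSums (p :: rest) ↔ ∃ y ∈ pvSums rest, x = y + p ∨ x = y - p := by
  simp [pvSums, List.mem_append, List.mem_map]
  constructor
  · rintro (⟨y, hy, rfl⟩ | ⟨y, hy, rfl⟩) <;> exact ⟨y, hy, by omega⟩
  · rintro ⟨y, hy, rfl | rfl⟩
    · exact Or.inl ⟨y, hy, rfl⟩
    · exact Or.inr ⟨y, hy, rfl⟩

theorem pvMem_sums_snoc {xs : List Int} {d x : Int} :
    x ∈ pvSums (xs ++ [d]) ↔ ∃ y ∈ pvSums xs, x = y + d ∨ x = y - d := by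
  induction xs generalizing x with
  | nil => simp [pvSums]
  | cons p rest ih =>
    rw [List.cons_append, pvMem_sums_cons]
    constructor
    · rintro ⟨y, hy, hx⟩
      rcases ih.mp hy with ⟨z, hz, hzy⟩
      rcases hx with rfl | rfl <;> rcases hzy with rfl | rfl
      · exact ⟨z + p, pvMem_sums_cons.mpr ⟨z, hz, Or.inl rfl⟩, Or.inl (by ring)⟩
      · exact ⟨z + p, pvMem_sums_cons.mpr ⟨z, hz, Or.inl rfl⟩, Or.inr (by ring)⟩
      · exact ⟨z - p, pvMem_sums_cons.mpr ⟨z, hz, Or.inr rfl⟩, Or.inl (by ring)⟩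
      · exact ⟨z - p, pvMem_sums_cons.mpr ⟨z, hz, Or.inr rfl⟩, Or.inr (by ring)⟩
    · rintro ⟨y', hy', hxd⟩
      rcases pvMem_sums_cons.mp hy' with ⟨z, hz, hzy⟩
      rcases hxd with rfl | rfl <;> rcases hzy with rfl | rfl
      · exact ⟨z + d, ih.mpr ⟨z, hz, Or.inl rfl⟩, Or.inl (by ring)⟩
      · exact ⟨z + d, ih.mpr ⟨z, hz, Or.inl rfl⟩, Or.inr (by ring)⟩
      · exact ⟨z - d, ih.mpr ⟨z, hz, Or.inr rfl⟩, Or.inl (by ring)⟩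
      · exact ⟨z - d, ih.mpr ⟨z, hz, Or.inr rfl⟩, Or.inr (by ring)⟩

theorem pvLength_sums (xs : List Int) : (pvSums xs).length = 2 ^ xs.length := by
  induction xs with
  | nil => simp [pvSums]
  | cons p rest ih => simp [pvSums, ih]; ring

theorem pvB_mem (ps : List Int) (r : List Int) (x : Int) :
    x ∈ ps.foldl
      (fun r p => PySem.Set.union (PySem.Set.ofList (r.map (· + p))) (r.map (· - p))) r
    ↔ ∃ s ∈ r, ∃ t ∈ pvSums ps, x = s + t := by
  induction ps generalizing r with
  | nil => simp [pvSums]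
  | cons p rest ih =>
    rw [List.foldl_cons, ih]
    constructor
    · rintro ⟨s', hs', t', ht', rfl⟩
      rcases (PySem.Set.mem_union _ _ _).mp hs' with h | h
      · rcases List.mem_map.mp ((PySem.Set.mem_ofList _ _).mp h) with ⟨s, hs, rfl⟩
        exact ⟨s, hs, t' + p, pvMem_sums_cons.mpr ⟨t', ht', Or.inl rfl⟩, by ring⟩
      · rcases List.mem_map.mp h with ⟨s, hs, rfl⟩
        exact ⟨s, hs, t' - p, pvMem_sums_cons.mpr ⟨t', ht', Or.inr rfl⟩, by ring⟩
    · rintro ⟨s, hs, t, ht, rfl⟩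
      rcases pvMem_sums_cons.mp ht with ⟨t', ht', rfl | rfl⟩
      · exact ⟨s + p, (PySem.Set.mem_union _ _ _).mpr (Or.inl ((PySem.Set.mem_ofList _ _).mpr (List.mem_map.mpr ⟨s, hs, rfl⟩))), t', ht', by ring⟩
      · exact ⟨s - p, (PySem.Set.mem_union _ _ _).mpr (Or.inr (List.mem_map.mpr ⟨s, hs, rfl⟩)), t', ht', by ring⟩

theorem pvFoldl_add_length (xs : List Int) : ∀ s : PySem.Set Int, (xs.foldl PySem.Set.add s).length ≤ s.length + xs.length := by
  induction xs with
  | nil => simp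
  | cons x xs ih =>
    intro s
    have h1 : (PySem.Set.add s x).length ≤ s.length + 1 := by
      simp [PySem.Set.add]; split <;> simp
    calc ((x :: xs).foldl PySem.Set.add s).length = (xs.foldl PySem.Set.add (PySem.Set.add s x)).length := rfl
      _ ≤ (PySem.Set.add s x).length + xs.length := ih _
      _ ≤ s.length + (x :: xs).length := by simp; omega

theorem pvDedup_length (xs : List Int) : (PySem.List.dedup xs).length ≤ xs.length := by
  have := pvFoldl_add_length xs []
  simpa [PySem.List.dedup_eq_ofList, PySem.Set.ofList_eq_foldl] using this

theorem pvGetD_set_self {seen : List (PySem.Set Int)} {i : Nat} {v d : PySem.Set Int}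
    (h : i < seen.length) : (seen.set i v).getD i d = v := by
  simp [List.getD_eq_getElem?_getD, h]

theorem pvGetD_set_ne {seen : List (PySem.Set Int)} {i j : Nat} {v d : PySem.Set Int}
    (h : j ≠ i) : (seen.set i v).getD j d = seen.getD j d := by
  simp [List.getD_eq_getElem?_getD, List.getElem?_set_ne (by omega : i ≠ j)]

-- adding one genuinely new reachable state strictly decreases pvU
theorem pvU_set (ps : List Int) (seen : List (PySem.Set Int)) (i : Nat) (p : Int)
    (hi : i < ps.length) (hil : i < seen.length)
    (hp : p ∈ pvSums (ps.take i))
    (hnc : ¬ PySem.Set.contains (seen.getD i PySem.Set.empty) p = true) :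
    pvU ps (seen.set i (PySem.Set.add (seen.getD i PySem.Set.empty) p)) + 1 ≤ pvU ps seen := by
  have hlt : pvU ps (seen.set i (PySem.Set.add (seen.getD i PySem.Set.empty) p)) < pvU ps seen := by
    refine Finset.sum_lt_sum ?_ ⟨i, Finset.mem_range.mpr hi, ?_⟩
    · intro j _
      by_cases hji : j = i
      · subst hji
        rw [pvGetD_set_self hil]
        apply List.Sublist.length_le
        apply List.monotone_filter_right
        intro a ha
        simp only [Bool.not_eq_true'] at ha ⊢
        rcases Bool.eq_false_iff.mp ha with _
        by_contra hcon
        have h1 : a ∈ seen.getD j PySem.Set.empty := (PySem.Set.contains_iff _ _).mp (by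
          cases hb : PySem.Set.contains (seen.getD j PySem.Set.empty) a
          · exact absurd hb hcon
          · rfl)
        have : a ∈ PySem.Set.add (seen.getD j PySem.Set.empty) p :=
          (PySem.Set.mem_add _ _ _).mpr (Or.inl h1)
        rw [(PySem.Set.contains_iff _ _).mpr this] at ha
        simp at ha
      · rw [pvGetD_set_ne hji]
    · rw [pvGetD_set_self hil]
      have hpd : p ∈ PySem.List.dedup (pvSums (ps.take i)) := (PySem.List.mem_dedup _ _).mpr hp
      have hpadd : p ∈ PySem.Set.add (seen.getD i PySem.Set.empty) p :=
        (PySem.Set.mem_add _ _ _).mpr (Or.inr rfl)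
      have hsub : ((PySem.List.dedup (pvSums (ps.take i))).filter
            (fun q => !(PySem.Set.contains (PySem.Set.add (seen.getD i PySem.Set.empty) p) q))).Sublist
          ((PySem.List.dedup (pvSums (ps.take i))).filter
            (fun q => !(PySem.Set.contains (seen.getD i PySem.Set.empty) q))) := by
        apply List.monotone_filter_right
        intro a ha
        simp only [Bool.not_eq_true'] at ha ⊢
        by_contra hcon
        have h1 : a ∈ seen.getD i PySem.Set.empty := (PySem.Set.contains_iff _ _).mp (by
          cases hb : PySem.Set.contains (seen.getD i PySem.Set.empty) a
          · exact absurd hb hcon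
          · rfl)
        have : a ∈ PySem.Set.add (seen.getD i PySem.Set.empty) p :=
          (PySem.Set.mem_add _ _ _).mpr (Or.inl h1)
        rw [(PySem.Set.contains_iff _ _).mpr this] at ha
        simp at ha
      have hne : ((PySem.List.dedup (pvSums (ps.take i))).filter
            (fun q => !(PySem.Set.contains (PySem.Set.add (seen.getD i PySem.Set.empty) p) q))) ≠
          ((PySem.List.dedup (pvSums (ps.take i))).filter
            (fun q => !(PySem.Set.contains (seen.getD i PySem.Set.empty) q))) := by
        intro he
        have hpin : p ∈ (PySem.List.dedup (pvSums (ps.take i))).filter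
            (fun q => !(PySem.Set.contains (seen.getD i PySem.Set.empty) q)) := by
          apply List.mem_filter.mpr
          refine ⟨hpd, ?_⟩
          simp only [Bool.not_eq_true']
          cases hb : PySem.Set.contains (seen.getD i PySem.Set.empty) p
          · rfl
          · exact absurd hb hnc
        rw [← he] at hpin
        have := (List.mem_filter.mp hpin).2
        rw [(PySem.Set.contains_iff _ _).mpr hpadd] at this
        simp at this
      have hle := hsub.length_le
      rcases Nat.lt_or_ge ((PySem.List.dedup (pvSums (ps.take i))).filter
            (fun q => !(PySem.Set.contains (PySem.Set.add (seen.getD i PySem.Set.empty) p) q))).length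
          ((PySem.List.dedup (pvSums (ps.take i))).filter
            (fun q => !(PySem.Set.contains (seen.getD i PySem.Set.empty) q))).length with hlt' | hge
      · exact hlt'
      · exact absurd (hsub.eq_of_length (by omega)) hne
  omega

theorem pvSkip (goal : Int) (ps : List Int) (seen : List (PySem.Set Int)) (que : List (Nat × Int))
    (hS : pvInvSeen ps seen) (hC : pvInvClos goal ps seen que) :
    ∀ n i q, ps.length - i ≤ n → q ∈ seen.getD i PySem.Set.empty →
      (∃ s ∈ pvSums (ps.drop i), goal = q + s) → pvG goal ps que := by
  intro n
  induction n with
  | zero =>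
    intro i q hn hq _
    rcases (hS.2 i q hq) with ⟨hi, _⟩
    omega
  | succ n ih =>
    intro i q hn hq hreach
    rcases (hS.2 i q hq) with ⟨hi, _⟩
    rcases hreach with ⟨s, hs, hgoal⟩
    rw [List.drop_eq_getElem_cons hi] at hs
    rcases pvMem_sums_cons.mp hs with ⟨s', hs', hss⟩
    have hd : ps.getD i 0 = ps[i] := by
      simp [List.getD_eq_getElem?_getD, List.getElem?_eq_getElem hi]
    have key : ∀ c : Int, (c = q + ps[i] ∨ c = q - ps[i]) → goal = c + s' → pvG goal ps que := by
      intro c hc hg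
      have hmem : c ∈ [q + ps.getD i 0, q - ps.getD i 0] := by
        rw [hd]; rcases hc with rfl | rfl <;> simp
      rcases hC i q hq c hmem with h1 | h2 | h3
      · exact ih (i+1) c (by omega) h1 ⟨s', hs', hg⟩
      · exact ⟨(i+1, c), h2, s', hs', hg⟩
      · rcases h3 with ⟨hlen, hne⟩
        have : ps.drop (i+1) = [] := by
          apply List.drop_eq_nil_of_le; omega
        rw [this] at hs'
        simp [pvSums] at hs'
        subst hs'
        exact absurd (by omega : c = goal) hne
    rcases hss with rfl | rfl
    · exact key (q + ps[i]) (Or.inl rfl) (by omega)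
    · exact key (q - ps[i]) (Or.inr rfl) (by omega)

theorem pvLoop_main (goal : Int) (ps : List Int) :
    ∀ fuel seen que, pvInvW ps que → pvInvSeen ps seen → pvInvClos goal ps seen que →
      pvPhi ps seen que ≤ fuel →
      (pvLoopA goal ps fuel seen que = true ↔ pvG goal ps que) := by
  intro fuel
  induction fuel with
  | zero =>
    intro seen que _ _ _ hphi
    have : que = [] := by
      cases que with
      | nil => rfl
      | cons e rest => simp [pvPhi] at hphi
    subst this
    simp [pvLoopA, pvG]
  | succ fuel ih =>
    intro seen que hW hS hC hphi
    cases que with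
    | nil => simp [pvLoopA, pvG]
    | cons e rest =>
      obtain ⟨i, p⟩ := e
      by_cases hc : PySem.Set.contains (seen.getD i PySem.Set.empty) p = true
      · -- skip branch
        have hstep : pvLoopA goal ps (fuel+1) seen ((i,p) :: rest) = pvLoopA goal ps fuel seen rest := by
          rw [pvLoopA_cons, if_pos hc]
        have hC' : pvInvClos goal ps seen rest := by
          intro j q hq c hcm
          rcases hC j q hq c hcm with h1 | h2 | h3
          · exact Or.inl h1
          · rcases List.mem_cons.mp h2 with he | he
            · left
              have : j + 1 = i ∧ c = p := by
                constructor <;> [exact congrArg Prod.fst he; exact congrArg Prod.snd he]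
              rcases this with ⟨rfl, rfl⟩
              exact (PySem.Set.contains_iff _ _).mp hc
            · exact Or.inr (Or.inl he)
          · exact Or.inr (Or.inr h3)
        have hW' : pvInvW ps rest := fun e he => hW e (List.mem_cons_of_mem _ he)
        have hG : pvG goal ps ((i,p) :: rest) ↔ pvG goal ps rest := by
          constructor
          · rintro ⟨e, he, s, hs, hg⟩
            rcases List.mem_cons.mp he with rfl | he'
            · exact pvSkip goal ps seen rest hS hC' ps.length i p (by omega)
                ((PySem.Set.contains_iff _ _).mp hc) ⟨s, hs, hg⟩
            · exact ⟨e, he', s, hs, hg⟩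
          · rintro ⟨e, he, s, hs, hg⟩
            exact ⟨e, List.mem_cons_of_mem _ he, s, hs, hg⟩
        rw [hstep, ih seen rest hW' hS hC' (by simp [pvPhi] at hphi ⊢; omega), hG]
      · by_cases hl : i = ps.length
        · subst hl
          by_cases hg : goal = p
          · have hstep : pvLoopA goal ps (fuel+1) seen ((ps.length, p) :: rest) = true := by
              rw [pvLoopA_cons, if_neg hc, if_pos rfl, if_pos hg]
            rw [hstep]
            subst hg
            simp only [true_iff]
            exact ⟨(ps.length, goal), List.mem_cons_self, 0, by simp [List.drop_length, pvSums], by omega⟩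
          · have hstep : pvLoopA goal ps (fuel+1) seen ((ps.length, p) :: rest) = pvLoopA goal ps fuel seen rest := by
              rw [pvLoopA_cons, if_neg hc, if_pos rfl, if_neg hg]
            have hC' : pvInvClos goal ps seen rest := by
              intro j q hq c hcm
              rcases hC j q hq c hcm with h1 | h2 | h3
              · exact Or.inl h1
              · rcases List.mem_cons.mp h2 with he | he
                · have : j + 1 = ps.length ∧ c = p := by
                    constructor <;> [exact congrArg Prod.fst he; exact congrArg Prod.snd he]
                  rcases this with ⟨h1', rfl⟩
                  exact Or.inr (Or.inr ⟨h1', fun hcg => hg hcg.symm⟩)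
                · exact Or.inr (Or.inl he)
              · exact Or.inr (Or.inr h3)
            have hW' : pvInvW ps rest := fun e he => hW e (List.mem_cons_of_mem _ he)
            have hG : pvG goal ps ((ps.length, p) :: rest) ↔ pvG goal ps rest := by
              constructor
              · rintro ⟨e, he, s, hs, hgg⟩
                rcases List.mem_cons.mp he with rfl | he'
                · exfalso
                  simp [List.drop_length, pvSums] at hs
                  subst hs
                  exact hg (by omega)
                · exact ⟨e, he', s, hs, hgg⟩
              · rintro ⟨e, he, s, hs, hgg⟩
                exact ⟨e, List.mem_cons_of_mem _ he, s, hs, hgg⟩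
            rw [hstep, ih seen rest hW' hS hC' (by simp [pvPhi] at hphi ⊢; omega), hG]
        · -- expand branch
          have hi : i < ps.length := Nat.lt_of_le_of_ne (hW (i,p) (List.mem_cons_self)).1 hl
          have hil : i < seen.length := by rw [hS.1]; omega
          have hpmem : p ∈ pvSums (ps.take i) := (hW (i,p) (List.mem_cons_self)).2
          have hd : ps.getD i 0 = ps[i] := by
            simp [List.getD_eq_getElem?_getD, List.getElem?_eq_getElem hi]
          set s0 := seen.getD i PySem.Set.empty with hs0
          set seen' := seen.set i (PySem.Set.add s0 p) with hseen'
          set que' := rest ++ [(i+1, p + ps.getD i 0), (i+1, p - ps.getD i 0)] with hque'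
          have hstep : pvLoopA goal ps (fuel+1) seen ((i, p) :: rest) = pvLoopA goal ps fuel seen' que' := by
            rw [pvLoopA_cons, if_neg hc, if_neg hl]
          have htake : ps.take (i+1) = ps.take i ++ [ps[i]] := by
            rw [List.take_add_one, List.getElem?_eq_getElem hi]; rfl
          have hW' : pvInvW ps que' := by
            intro e he
            rcases List.mem_append.mp he with he | he
            · exact hW e (List.mem_cons_of_mem _ he)
            · have : e = (i+1, p + ps.getD i 0) ∨ e = (i+1, p - ps.getD i 0) := by
                simpa using he
              rcases this with rfl | rfl
              · exact ⟨by omega, by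
                  rw [htake]
                  exact pvMem_sums_snoc.mpr ⟨p, hpmem, Or.inl (by rw [hd])⟩⟩
              · exact ⟨by omega, by
                  rw [htake]
                  exact pvMem_sums_snoc.mpr ⟨p, hpmem, Or.inr (by rw [hd])⟩⟩
          have hgetD' : ∀ j, seen'.getD j PySem.Set.empty =
              if j = i then PySem.Set.add s0 p else seen.getD j PySem.Set.empty := by
            intro j
            by_cases hji : j = i
            · subst hji; rw [hseen', pvGetD_set_self hil, if_pos rfl]
            · rw [hseen', pvGetD_set_ne hji, if_neg hji]
          have hS' : pvInvSeen ps seen' := by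
            constructor
            · rw [hseen', List.length_set, hS.1]
            · intro j q hq
              rw [hgetD' j] at hq
              by_cases hji : j = i
              · subst hji
                rw [if_pos rfl] at hq
                rcases (PySem.Set.mem_add _ _ _).mp hq with h | rfl
                · exact hS.2 _ _ h
                · exact ⟨hi, hpmem⟩
              · rw [if_neg hji] at hq
                exact hS.2 _ _ hq
          have hC' : pvInvClos goal ps seen' que' := by
            intro j q hq c hcm
            rw [hgetD' j] at hq
            have hold : q ∈ seen.getD j PySem.Set.empty → _ := fun hq' => hC j q hq' c hcm
            by_cases hji : j = i
            · subst hji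
              rw [if_pos rfl] at hq
              rcases (PySem.Set.mem_add _ _ _).mp hq with hqold | rfl
              · -- old member of seen[i]
                rcases hC j q hqold c hcm with h1 | h2 | h3
                · left; rw [hgetD' (j+1), if_neg (by omega)]; exact h1
                · rcases List.mem_cons.mp h2 with he | he
                  · exfalso
                    have : j + 1 = j := congrArg Prod.fst he
                    omega
                  · exact Or.inr (Or.inl (List.mem_append.mpr (Or.inl he)))
                · exact Or.inr (Or.inr h3)
              · -- the freshly expanded p: children are in que'
                right; left
                apply List.mem_append.mpr; right
                rcases List.mem_cons.mp hcm with rfl | hcm'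
                · simp
                · simp at hcm'
                  subst hcm'
                  simp
            · rw [if_neg hji] at hq
              rcases hC j q hq c hcm with h1 | h2 | h3
              · left
                rw [hgetD' (j+1)]
                by_cases hj1 : j + 1 = i
                · rw [if_pos hj1]
                  subst hj1
                  exact (PySem.Set.mem_add _ _ _).mpr (Or.inl h1)
                · rw [if_neg hj1]; exact h1
              · rcases List.mem_cons.mp h2 with he | he
                · have : j + 1 = i ∧ c = p := by
                    constructor <;> [exact congrArg Prod.fst he; exact congrArg Prod.snd he]
                  rcases this with ⟨hj1, rfl⟩
                  left
                  rw [hgetD' (j+1), if_pos hj1]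
                  exact (PySem.Set.mem_add _ _ _).mpr (Or.inr rfl)
                · exact Or.inr (Or.inl (List.mem_append.mpr (Or.inl he)))
              · exact Or.inr (Or.inr h3)
          have hphi' : pvPhi ps seen' que' ≤ fuel := by
            have hu : pvU ps seen' + 1 ≤ pvU ps seen := by
              rw [hseen', hs0]
              exact pvU_set ps seen i p hi hil hpmem hc
            simp only [pvPhi, hque', List.length_append, List.length_cons, List.length_nil] at hphi ⊢
            omega
          have hdropi : ps.drop i = ps[i] :: ps.drop (i+1) := List.drop_eq_getElem_cons hi
          have hG : pvG goal ps ((i,p) :: rest) ↔ pvG goal ps que' := by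
            constructor
            · rintro ⟨e, he, s, hs, hg⟩
              rcases List.mem_cons.mp he with rfl | he'
              · simp only at hs hg
                rw [hdropi] at hs
                rcases pvMem_sums_cons.mp hs with ⟨s', hs', rfl | rfl⟩
                · exact ⟨(i+1, p + ps.getD i 0), List.mem_append.mpr (Or.inr (by simp)), s', hs',
                    by simp only; rw [hd]; omega⟩
                · exact ⟨(i+1, p - ps.getD i 0), List.mem_append.mpr (Or.inr (by simp)), s', hs',
                    by simp only; rw [hd]; omega⟩
              · exact ⟨e, List.mem_append.mpr (Or.inl he'), s, hs, hg⟩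
            · rintro ⟨e, he, s, hs, hg⟩
              rcases List.mem_append.mp he with he' | he'
              · exact ⟨e, List.mem_cons_of_mem _ he', s, hs, hg⟩
              · have : e = (i+1, p + ps.getD i 0) ∨ e = (i+1, p - ps.getD i 0) := by simpa using he'
                rcases this with rfl | rfl
                · refine ⟨(i, p), List.mem_cons_self, s + ps[i], ?_, ?_⟩
                  · rw [hdropi]
                    exact pvMem_sums_cons.mpr ⟨s, hs, Or.inl rfl⟩
                  · simp only at hg ⊢; rw [hd] at hg; omega
                · refine ⟨(i, p), List.mem_cons_self, s - ps[i], ?_, ?_⟩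
                  · rw [hdropi]
                    exact pvMem_sums_cons.mpr ⟨s, hs, Or.inr rfl⟩
                  · simp only at hg ⊢; rw [hd] at hg; omega
          rw [hstep, ih seen' que' hW' hS' hC' hphi', hG]

theorem pvGetD_replicate (n i : Nat) :
    (List.replicate n (PySem.Set.empty : PySem.Set Int)).getD i PySem.Set.empty = PySem.Set.empty := by
  rcases Nat.lt_or_ge i n with h | h
  · simp [List.getD_eq_getElem?_getD, h]
  · have : (List.replicate n (PySem.Set.empty : PySem.Set Int))[i]? = none := by
      apply List.getElem?_eq_none
      simpa using h
    rw [List.getD_eq_getElem?_getD, this]; rfl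

theorem pvU_init (ps : List Int) :
    pvU ps (List.replicate (ps.length + 1) PySem.Set.empty) ≤ 2 ^ ps.length - 1 := by
  have hterm : ∀ i ∈ Finset.range ps.length,
      ((PySem.List.dedup (pvSums (ps.take i))).filter
        (fun q => !(PySem.Set.contains ((List.replicate (ps.length + 1) PySem.Set.empty).getD i PySem.Set.empty) q))).length
      ≤ 2 ^ i := by
    intro i hi
    have hi' : i < ps.length := Finset.mem_range.mp hi
    calc _ ≤ (PySem.List.dedup (pvSums (ps.take i))).length := (List.filter_sublist).length_le
      _ ≤ (pvSums (ps.take i)).length := pvDedup_length _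
      _ = 2 ^ (ps.take i).length := pvLength_sums _
      _ = 2 ^ i := by rw [List.length_take_of_le (by omega)]
  calc pvU ps (List.replicate (ps.length + 1) PySem.Set.empty)
      ≤ ∑ i ∈ Finset.range ps.length, 2 ^ i := Finset.sum_le_sum hterm
    _ = 2 ^ ps.length - 1 := by
        induction ps.length with
        | zero => simp
        | succ n ihn =>
          rw [Finset.sum_range_succ, ihn]
          have : 1 ≤ 2 ^ n := Nat.one_le_two_pow
          omega

-- ===== VERDICT (by name: the statement is the Claim_ definition above) =====
theorem solve_axis_spec : Claim_equal_solve_axis := by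
  intro goal ps _
  unfold Spec_solve_axis
  have hA : solve_axis goal ps = true ↔ ∃ s ∈ pvSums ps, goal = s := by
    unfold solve_axis
    rw [pvLoop_main goal ps _ _ _
      (by rintro e he; simp at he; subst he; exact ⟨by omega, by simp [pvSums]⟩)
      (⟨by simp, by intro i q hq; rw [pvGetD_replicate] at hq; simp [PySem.Set.empty] at hq⟩)
      (by intro i q hq; rw [pvGetD_replicate] at hq; simp [PySem.Set.empty] at hq)
      (by
        have hu := pvU_init ps
        have h1 : (1:Nat) ≤ 2 ^ ps.length := Nat.one_le_two_pow
        have h2 : (2:Nat) ^ (ps.length + 2) = 4 * 2 ^ ps.length := by ring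
        simp only [pvPhi, List.length_cons, List.length_nil]
        omega)]
    constructor
    · rintro ⟨e, he, s, hs, hg⟩
      simp at he
      subst he
      exact ⟨s, by simpa using hs, by omega⟩
    · rintro ⟨s, hs, hg⟩
      exact ⟨(0, 0), by simp, s, by simpa using hs, by omega⟩
  have hB : solve_axis_alt goal ps = true ↔ ∃ s ∈ pvSums ps, goal = s := by
    unfold solve_axis_alt
    rw [PySem.Set.contains_iff, pvB_mem]
    constructor
    · rintro ⟨s, hs, t, ht, rfl⟩
      rw [PySem.Set.mem_ofList] at hs
      simp at hs
      subst hs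
      exact ⟨t, ht, by omega⟩
    · rintro ⟨s, hs, rfl⟩
      exact ⟨0, by rw [PySem.Set.mem_ofList]; simp, goal, hs, by ring⟩
  cases hA' : solve_axis goal ps
  · cases hB' : solve_axis_alt goal ps
    · rfl
    · exact absurd (hA.mpr (hB.mp hB')) (by simp [hA'])
  · exact (hB.mpr (hA.mp hA')).symm
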